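-- pv_equiv track=rewrite | github.com/gibme-c/ranshaw | tools/validate_test_vectors.py | poly_from_roots
-- ===== SOURCE A (Python) =====
-- from typing import List, Tuple, Optional
--
-- def poly_from_roots(roots: List[int], p: int) -> List[int]:
--     """Build monic polynomial from roots: prod(x - r_i)."""
--     result = [1]
--     for r in roots:
--         new = [0] * (len(result) + 1)
--         for i, c in enumerate(result):
--             new[i] = (new[i] - c * r) % p
--             new[i + 1] = (new[i + 1] + c) % p
--         result = new
--     return result
-- ===== SOURCE B (Python) =====
-- def poly_from_roots(roots, p):
--     """Build monic polynomial from roots via a divide-and-conquer product tree."""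
--     def mul(a, b):
--         out = [0] * (len(a) + len(b) - 1)
--         for i, x in enumerate(a):
--             for j, y in enumerate(b):
--                 out[i + j] = (out[i + j] + x * y) % p
--         return out
--
--     def prod(rs):
--         if len(rs) == 0:
--             return [1]
--         if len(rs) == 1:
--             return [(-rs[0]) % p, 1 % p]
--         m = len(rs) // 2
--         return mul(prod(rs[:m]), prod(rs[m:]))
--
--     return prod(roots)
-- ===== Notes on version B (the rewrite author's own statement) =====
-- stated objective: alternative
-- what changed: Replaces A's left-to-right fold that multiplies the accumulator by one linear factor at a time (with in-place two-write updates) with a divide-and-conquer product tree: split the root list in half, recurse, and combine with a schoolbook polynomial multiplication reducing each coefficient mod p.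
import Mathlib
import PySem

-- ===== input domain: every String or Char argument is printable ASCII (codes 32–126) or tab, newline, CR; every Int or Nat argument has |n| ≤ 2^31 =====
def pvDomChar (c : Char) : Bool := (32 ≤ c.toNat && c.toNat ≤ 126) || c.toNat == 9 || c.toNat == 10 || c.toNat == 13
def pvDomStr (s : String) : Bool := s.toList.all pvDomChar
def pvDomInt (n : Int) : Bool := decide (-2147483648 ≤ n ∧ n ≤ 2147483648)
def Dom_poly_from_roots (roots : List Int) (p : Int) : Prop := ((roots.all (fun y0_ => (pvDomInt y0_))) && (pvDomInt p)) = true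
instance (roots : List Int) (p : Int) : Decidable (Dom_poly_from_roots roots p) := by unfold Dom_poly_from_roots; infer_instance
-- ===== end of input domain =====

-- B replaces A's one-root-at-a-time left fold by a divide-and-conquer product tree combined
-- with a schoolbook polynomial multiplication mod p (alternative algorithm, same asymptotic cost).

-- ===== PORT A =====
-- inner loop `for i, c in enumerate(result)`: two in-place writes per step
-- (list indexing/assignment is always in range here, so List.getD/List.set are exact)
def pvLoopA (p r : Int) : List Int → Nat → List Int → List Int
  | [], _, new => new
  | c :: rest, i, new =>
    let new1 := new.set i (PySem.Int.mod (new.getD i 0 - c * r) p)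
    let new2 := new1.set (i + 1) (PySem.Int.mod (new1.getD (i + 1) 0 + c) p)
    pvLoopA p r rest (i + 1) new2

def poly_from_roots (roots : List Int) (p : Int) : List Int :=
  roots.foldl (fun result r => pvLoopA p r result 0 (List.replicate (result.length + 1) 0)) [1]

-- ===== PORT B =====
-- `for j, y in enumerate(b): out[i+j] = (out[i+j] + x*y) % p`
def pvInnerB (p x : Int) (i : Nat) : List Int → Nat → List Int → List Int
  | [], _, out => out
  | y :: rest, j, out =>
      pvInnerB p x i rest (j + 1) (out.set (i + j) (PySem.Int.mod (out.getD (i + j) 0 + x * y) p))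

-- `for i, x in enumerate(a):`
def pvOuterB (p : Int) (bs : List Int) : List Int → Nat → List Int → List Int
  | [], _, out => out
  | x :: rest, i, out => pvOuterB p bs rest (i + 1) (pvInnerB p x i bs 0 out)

-- mul(a, b): schoolbook product with each coefficient reduced mod p
def pvMulB (p : Int) (a b : List Int) : List Int :=
  pvOuterB p b a 0 (List.replicate (a.length + b.length - 1) 0)

-- prod(rs): the product tree over a slice of the roots
def pvProd (p : Int) (rs : List Int) : List Int :=
  match rs with
  | [] => [1]
  | [r] => [PySem.Int.mod (-r) p, PySem.Int.mod 1 p]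
  | r0 :: r1 :: rest =>
      pvMulB p (pvProd p ((r0 :: r1 :: rest).take ((r0 :: r1 :: rest).length / 2)))
               (pvProd p ((r0 :: r1 :: rest).drop ((r0 :: r1 :: rest).length / 2)))
termination_by rs.length
decreasing_by
  · simp [List.length_take]; omega
  · simp [List.length_drop]; omega

def poly_from_roots_alt (roots : List Int) (p : Int) : List Int := pvProd p roots

-- ===== PRECONDITION & SPEC =====
-- Python A raises ZeroDivisionError iff p = 0 and roots is nonempty (the first `% p` hit); B raises there too.
def Pre_poly_from_roots (roots : List Int) (p : Int) : Prop := roots = [] ∨ p ≠ 0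
instance (roots : List Int) (p : Int) : Decidable (Pre_poly_from_roots roots p) := by
  unfold Pre_poly_from_roots; infer_instance

def pvWitness_poly_from_roots : List Int × Int := ([2, 3], 5)

def Spec_poly_from_roots (roots : List Int) (p : Int) (out : List Int) : Prop := out = poly_from_roots_alt roots p
instance (roots : List Int) (p : Int) (out : List Int) : Decidable (Spec_poly_from_roots roots p out) := by unfold Spec_poly_from_roots; infer_instance

-- ===== CLAIM (what is proved, stated in full; the proofs are below) =====
def Claim_equal_poly_from_roots : Prop := ∀ (roots : List Int) (p : Int), Dom_poly_from_roots roots p → Pre_poly_from_roots roots p → Spec_poly_from_roots roots p (poly_from_roots roots p)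

-- ===== LEMMAS AND PROOFS =====

-- `dg xs i` : xs[i] read with default 0 (all coefficient lists are indexed this way below)
def dg (xs : List Int) (i : Nat) : Int := xs.getD i 0

-- exact (mod-free) coefficients of the step `result * (x - r)` at index i
def sEnt (xs : List Int) (r : Int) (i : Nat) : Int :=
  (if i = 0 then 0 else dg xs (i - 1)) - dg xs i * r

def stepE (xs : List Int) (r : Int) : List Int := (List.range (xs.length + 1)).map (sEnt xs r)

-- exact coefficients of prod (x - r_i), folded left like A does
def polyE (roots : List Int) : List Int := roots.foldl stepE [1]

-- exact convolution entry, partial (first i rows) and full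
def cEntP (a b : List Int) (i k : Nat) : Int :=
  ∑ i' ∈ Finset.range i, dg a i' * (if i' ≤ k then dg b (k - i') else 0)

def cEnt (a b : List Int) (k : Nat) : Int := cEntP a b a.length k

def convE (a b : List Int) : List Int := (List.range (a.length + b.length - 1)).map (cEnt a b)

-- ---- Int.fmod facts (PySem.Int.mod a b = a.fmod b) ----
lemma pmod_def (a b : Int) : PySem.Int.mod a b = a.fmod b := rfl

lemma fmod_emod (a p : Int) : a.fmod p % p = a % p := by
  rw [Int.fmod_eq_emod]
  split_ifs with h
  · simp
  · simpa using Int.add_mul_emod_self_left (a := a % p) (b := p) (c := 1)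

lemma fmod_congr {a b p : Int} (h : a % p = b % p) : a.fmod p = b.fmod p := by
  rw [Int.fmod_eq_emod, Int.fmod_eq_emod, h]
  have hiff : (p ∣ a) ↔ (p ∣ b) := by
    rw [← EuclideanDomain.mod_eq_zero, ← EuclideanDomain.mod_eq_zero, h]
  simp only [hiff]

lemma fmod_sub_left (a b p : Int) : (a.fmod p - b).fmod p = (a - b).fmod p := by
  apply fmod_congr
  conv_lhs => rw [Int.sub_emod, fmod_emod, ← Int.sub_emod]

lemma fmod_add_left (a b p : Int) : (a.fmod p + b).fmod p = (a + b).fmod p := by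
  apply fmod_congr
  conv_lhs => rw [Int.add_emod, fmod_emod, ← Int.add_emod]

-- ---- dg facts ----
lemma dg_of_ge {xs : List Int} {i : Nat} (h : xs.length ≤ i) : dg xs i = 0 := by
  simp [dg, List.getD_eq_getElem?_getD, List.getElem?_eq_none (by omega : xs.length ≤ i)]

lemma dg_set (l : List Int) (i j : Nat) (v : Int) :
    dg (l.set i v) j = if i = j ∧ j < l.length then v else dg l j := by
  simp only [dg, List.getD_eq_getElem?_getD, List.getElem?_set]
  split_ifs with h1 h2 h3 h4 <;> simp_all <;> omega

lemma dg_replicate (m : Nat) (j : Nat) : dg (List.replicate m (0 : Int)) j = 0 := by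
  simp [dg, List.getD_eq_getElem?_getD, List.getElem?_replicate]
  split_ifs <;> simp

lemma dg_range_map (f : Nat → Int) (n j : Nat) :
    dg ((List.range n).map f) j = if j < n then f j else 0 := by
  simp [dg, List.getD_eq_getElem?_getD, List.getElem?_map, List.getElem?_range']
  split_ifs with h
  · simp [List.getElem?_range, h]
  · simp [List.getElem?_eq_none (by simpa using h : ((List.range n).length ≤ j))]

lemma dg_map_fmod (xs : List Int) (p : Int) (j : Nat) :
    dg (xs.map (·.fmod p)) j = (dg xs j).fmod p := by
  by_cases h : j < xs.length
  · simp [dg, List.getD_eq_getElem?_getD, List.getElem?_map, List.getElem?_eq_getElem h]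
  · rw [dg_of_ge (by simpa using not_lt.mp h), dg_of_ge (not_lt.mp h)]
    simp [Int.zero_fmod]

lemma eq_of_dg {xs ys : List Int} (hl : xs.length = ys.length)
    (h : ∀ k, dg xs k = dg ys k) : xs = ys := by
  apply List.ext_getElem hl
  intro i h1 h2
  have := h i
  simpa [dg, List.getD_eq_getElem?_getD, List.getElem?_eq_getElem, h1, h2] using this

lemma drop_cons_facts {bs : List Int} {j : Nat} {y : Int} {rest : List Int}
    (h : bs.drop j = y :: rest) : dg bs j = y ∧ bs.drop (j + 1) = rest ∧ j < bs.length := by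
  have hj : j < bs.length := by
    by_contra hc
    simp [List.drop_eq_nil_of_le (not_lt.mp hc)] at h
  refine ⟨?_, ?_, hj⟩
  · have h0 : (bs.drop j)[0]? = some y := by rw [h]; rfl
    rw [List.getElem?_drop] at h0
    simp only [Nat.add_zero] at h0
    simp [dg, List.getD_eq_getElem?_getD, h0]
  · have : bs.drop (j + 1) = (bs.drop j).drop 1 := by rw [List.drop_drop, Nat.add_comm]
    rw [this, h]; rfl

-- ---- out-of-support zeros ----
lemma sEnt_of_ge {xs : List Int} {r : Int} {i : Nat} (h : xs.length + 1 ≤ i) : sEnt xs r i = 0 := by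
  have h1 : dg xs i = 0 := dg_of_ge (by omega)
  have h2 : dg xs (i - 1) = 0 := dg_of_ge (by omega)
  simp only [sEnt, h1, h2, zero_mul, sub_zero]
  rw [if_neg (by omega)]

lemma cEnt_of_ge {a b : List Int} {k : Nat} (h : a.length + b.length - 1 ≤ k) : cEnt a b k = 0 := by
  unfold cEnt cEntP
  apply Finset.sum_eq_zero
  intro i hi
  simp only [Finset.mem_range] at hi
  split_ifs with hik
  · rw [dg_of_ge (show b.length ≤ k - i by omega), mul_zero]
  · rw [mul_zero]

lemma dg_stepE (xs : List Int) (r : Int) (j : Nat) : dg (stepE xs r) j = sEnt xs r j := by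
  rw [stepE, dg_range_map]
  split_ifs with h
  · rfl
  · exact (sEnt_of_ge (by omega)).symm

lemma dg_convE (a b : List Int) (j : Nat) : dg (convE a b) j = cEnt a b j := by
  rw [convE, dg_range_map]
  split_ifs with h
  · rfl
  · exact (cEnt_of_ge (by omega)).symm

-- ---- A-side characterization ----
lemma pvLoopA_spec (p r : Int) :
    ∀ (ys xs : List Int) (t : Nat) (new : List Int),
      xs.drop t = ys → t ≤ xs.length → new.length = xs.length + 1 →
      (∀ j, j < t → dg new j = (sEnt xs r j).fmod p) →
      dg new t = (if t = 0 then 0 else (dg xs (t - 1)).fmod p) →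
      (∀ j, t < j → dg new j = 0) →
      pvLoopA p r ys t new = (stepE xs r).map (·.fmod p) := by
  intro ys
  induction ys with
  | nil =>
    intro xs t new hdrop ht hlen h1 h2 h3
    have hteq : t = xs.length := by
      have := List.drop_eq_nil_iff.mp hdrop; omega
    subst hteq
    simp only [pvLoopA]
    apply eq_of_dg (by simp [hlen, stepE])
    intro k
    rw [dg_map_fmod, dg_stepE]
    rcases Nat.lt_trichotomy k xs.length with hk | hk | hk
    · exact h1 k hk
    · subst hk
      rw [h2]
      have hz : dg xs xs.length = 0 := dg_of_ge le_rfl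
      unfold sEnt
      rw [hz, zero_mul, sub_zero]
      split_ifs with h0
      · rw [Int.zero_fmod]
      · rfl
    · rw [h3 k hk, sEnt_of_ge (by omega), Int.zero_fmod]
  | cons c rest ih =>
    intro xs t new hdrop ht hlen h1 h2 h3
    obtain ⟨hc, hrest, htlt⟩ := drop_cons_facts hdrop
    show pvLoopA p r rest (t + 1) _ = _
    set v1 : Int := PySem.Int.mod (dg new t - c * r) p with hv1
    set new1 := new.set t v1 with hnew1
    set v2 : Int := PySem.Int.mod (dg new1 (t + 1) + c) p with hv2
    set new2 := new1.set (t + 1) v2 with hnew2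
    have hlen1 : new1.length = xs.length + 1 := by simp [hnew1, hlen]
    have hlen2 : new2.length = xs.length + 1 := by simp [hnew2, hlen1]
    have hdg1 : ∀ j, dg new1 j = if t = j ∧ j < new.length then v1 else dg new j := fun j => dg_set _ _ _ _
    have hdg2 : ∀ j, dg new2 j = if t + 1 = j ∧ j < new1.length then v2 else dg new1 j := fun j => dg_set _ _ _ _
    have hv2e : v2 = (dg xs t).fmod p := by
      have : dg new1 (t + 1) = 0 := by
        rw [hdg1]; simp only [if_neg (by omega : ¬ (t = t + 1 ∧ t + 1 < new.length))]
        exact h3 (t + 1) (by omega)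
      rw [hv2, pmod_def, this, zero_add, hc]
    have hv1e : v1 = (sEnt xs r t).fmod p := by
      rw [hv1, pmod_def, h2, ← hc]
      unfold sEnt
      split_ifs with h0
      · rfl
      · rw [fmod_sub_left]
    apply ih xs (t + 1) new2 hrest (by omega) hlen2
    · intro j hj
      rcases Nat.lt_or_ge j t with hjt | hjt
      · rw [hdg2, if_neg (by omega), hdg1, if_neg (by omega)]
        exact h1 j hjt
      · have hje : j = t := by omega
        subst hje
        rw [hdg2, if_neg (by omega), hdg1, if_pos ⟨rfl, by omega⟩, hv1e]
    · rw [hdg2, if_pos ⟨rfl, by omega⟩, hv2e]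
      simp
    · intro j hj
      rw [hdg2, if_neg (by omega), hdg1, if_neg (by omega)]
      exact h3 j (by omega)

lemma stepA_spec (p r : Int) (ys : List Int) :
    pvLoopA p r ys 0 (List.replicate (ys.length + 1) 0) = (stepE ys r).map (·.fmod p) := by
  apply pvLoopA_spec p r ys ys 0 _ (by simp) (by omega) (by simp)
  · intro j hj; omega
  · simp [dg_replicate]
  · intro j _; exact dg_replicate _ _

lemma stepE_fmod_congr (xs : List Int) (r p : Int) :
    (stepE (xs.map (·.fmod p)) r).map (·.fmod p) = (stepE xs r).map (·.fmod p) := by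
  apply eq_of_dg (by simp [stepE])
  intro k
  rw [show ∀ zs : List Int, dg (zs.map (·.fmod p)) k = (dg zs k).fmod p from fun zs => dg_map_fmod zs p k,
      show dg ((stepE xs r).map (·.fmod p)) k = (dg (stepE xs r) k).fmod p from dg_map_fmod _ p k]
  rw [dg_stepE, dg_stepE]
  unfold sEnt
  rw [dg_map_fmod, dg_map_fmod]
  apply fmod_congr
  have h1 : (if k = 0 then (0:Int) else (dg xs (k-1)).fmod p) % p
      = (if k = 0 then (0:Int) else dg xs (k-1)) % p := by
    split_ifs with h0
    · rfl
    · exact fmod_emod _ _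
  exact Int.ModEq.sub h1 (Int.ModEq.mul_right r (fmod_emod _ _))

lemma polyE_length (roots : List Int) : (polyE roots).length = roots.length + 1 := by
  induction roots using List.reverseRecOn with
  | nil => simp [polyE]
  | append_singleton rs r ih =>
    simp only [polyE, List.foldl_append, List.foldl_cons, List.foldl_nil] at *
    simp [stepE, ih]

lemma polyE_ne_nil (roots : List Int) : polyE roots ≠ [] := by
  have := polyE_length roots
  intro h; rw [h] at this; simp at this

lemma polyA_spec (p : Int) : ∀ (roots : List Int), roots ≠ [] →
    poly_from_roots roots p = (polyE roots).map (·.fmod p) := by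
  intro roots
  induction roots using List.reverseRecOn with
  | nil => intro h; exact absurd rfl h
  | append_singleton rs r ih =>
    intro _
    unfold poly_from_roots polyE
    rw [List.foldl_append, List.foldl_append]
    simp only [List.foldl_cons, List.foldl_nil]
    rcases eq_or_ne rs [] with hrs | hrs
    · subst hrs
      simp only [List.foldl_nil]
      exact stepA_spec p r [1]
    · have ihe := ih hrs
      unfold poly_from_roots polyE at ihe
      rw [ihe, stepA_spec p r]
      exact stepE_fmod_congr _ r p

-- ---- B-side characterization ----
lemma pvInnerB_spec (p x : Int) (i : Nat) :
    ∀ (ys bs : List Int) (j : Nat) (out : List Int),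
      bs.drop j = ys → i + bs.length ≤ out.length →
      (pvInnerB p x i ys j out).length = out.length ∧
      (∀ k, dg (pvInnerB p x i ys j out) k =
        if i + j ≤ k ∧ k < i + bs.length then (dg out k + x * dg bs (k - i)).fmod p else dg out k) := by
  intro ys
  induction ys with
  | nil =>
    intro bs j out hdrop hlen
    have hj : bs.length ≤ j := by
      by_contra hc
      have : j < bs.length := by omega
      have := List.drop_eq_nil_iff.mp hdrop
      omega
    refine ⟨by simp [pvInnerB], fun k => ?_⟩
    simp only [pvInnerB]
    rw [if_neg (by omega)]
  | cons y rest ih =>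
    intro bs j out hdrop hlen
    obtain ⟨hy, hrest, hjlt⟩ := drop_cons_facts hdrop
    simp only [pvInnerB]
    set v : Int := PySem.Int.mod (out.getD (i + j) 0 + x * y) p with hv
    set out1 := out.set (i + j) v with hout1
    have hlen1 : out1.length = out.length := by simp [hout1]
    obtain ⟨ihl, ihd⟩ := ih bs (j + 1) out1 hrest (by omega)
    refine ⟨by rw [ihl, hlen1], fun k => ?_⟩
    rw [ihd k]
    have hdg1 : ∀ k', dg out1 k' = if i + j = k' ∧ k' < out.length then v else dg out k' :=
      fun k' => dg_set _ _ _ _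
    split_ifs with hin hall hall
    · -- i+j+1 ≤ k < i+lb : out1 agrees with out at k
      rw [hdg1, if_neg (by omega)]
    · -- contradiction: i+j+1 ≤ k but not i+j ≤ k
      omega
    · -- i+j ≤ k < i+lb but not i+j+1 ≤ k : k = i+j
      have hk : k = i + j := by omega
      subst hk
      rw [hdg1, if_pos ⟨rfl, by omega⟩, hv, pmod_def, show i + j - i = j by omega, hy]
      rfl
    · rw [hdg1]
      split_ifs with hk
      · omega
      · rfl

lemma cEntP_stable {as bs : List Int} {i k : Nat} (h : as.length ≤ i) :
    cEntP as bs i k = cEnt as bs k := by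
  unfold cEnt cEntP
  symm
  apply Finset.sum_subset (by intro x hx; simp only [Finset.mem_range] at *; omega)
  intro j _ hj
  simp only [Finset.mem_range, not_lt] at hj
  rw [dg_of_ge (by omega), zero_mul]

lemma pvOuterB_spec (p : Int) (bs : List Int) :
    ∀ (ys as : List Int) (i : Nat) (out : List Int),
      as.drop i = ys → out.length = as.length + bs.length - 1 →
      (∀ k, dg out k = (cEntP as bs i k).fmod p) →
      pvOuterB p bs ys i out = (List.range (as.length + bs.length - 1)).map (fun k => (cEnt as bs k).fmod p) := by
  intro ys
  induction ys with
  | nil =>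
    intro as i out hdrop hlen hinv
    have hi : as.length ≤ i := by
      by_contra hc
      have := List.drop_eq_nil_iff.mp hdrop; omega
    show out = _
    apply eq_of_dg (by simp [hlen])
    intro k
    rw [dg_range_map, hinv k, cEntP_stable hi]
    split_ifs with hk
    · rfl
    · rw [cEnt_of_ge (by omega), Int.zero_fmod]
  | cons x rest ih =>
    intro as i out hdrop hlen hinv
    obtain ⟨hx, hrest, hilt⟩ := drop_cons_facts hdrop
    show pvOuterB p bs rest (i + 1) (pvInnerB p x i bs 0 out) = _
    obtain ⟨hil, hid⟩ := pvInnerB_spec p x i bs bs 0 out rfl (by omega)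
    apply ih as (i + 1) _ hrest (by rw [hil, hlen])
    intro k
    rw [hid k]
    have hsucc : cEntP as bs (i + 1) k
        = cEntP as bs i k + dg as i * (if i ≤ k then dg bs (k - i) else 0) := by
      unfold cEntP; rw [Finset.sum_range_succ]
    rw [hsucc, hx]
    split_ifs with hin hik hik
    · rw [hinv k, fmod_add_left]
    · omega
    · -- i ≤ k but k ≥ i + bs.length : dg bs (k - i) = 0
      rw [hinv k, dg_of_ge (show bs.length ≤ k - i by omega), mul_zero, add_zero]
    · rw [hinv k, mul_zero, add_zero]

lemma pvMulB_spec (p : Int) (a b : List Int) :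
    pvMulB p a b = (convE a b).map (·.fmod p) := by
  unfold pvMulB
  rw [pvOuterB_spec p b a a 0 _ rfl (by simp) (fun k => by simp [cEntP, dg_replicate, Int.zero_fmod])]
  apply eq_of_dg (by simp [convE])
  intro k
  rw [dg_range_map, show dg ((convE a b).map (·.fmod p)) k = (dg (convE a b) k).fmod p from dg_map_fmod _ p k, dg_convE]
  split_ifs with hk
  · rfl
  · rw [cEnt_of_ge (by omega), Int.zero_fmod]

lemma convE_fmod_congr (a b : List Int) (p : Int) :
    (convE (a.map (·.fmod p)) (b.map (·.fmod p))).map (·.fmod p) = (convE a b).map (·.fmod p) := by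
  apply eq_of_dg (by simp [convE])
  intro k
  rw [dg_map_fmod, dg_map_fmod, dg_convE, dg_convE]
  apply fmod_congr
  unfold cEnt cEntP
  simp only [List.length_map]
  rw [Finset.sum_int_mod, Finset.sum_int_mod (f := fun i' => dg a i' * (if i' ≤ k then dg b (k - i') else 0))]
  congr 1
  apply Finset.sum_congr rfl
  intro i _
  rw [dg_map_fmod, dg_map_fmod]
  conv_lhs => rw [Int.mul_emod, fmod_emod]
  conv_rhs => rw [Int.mul_emod]
  congr 1
  split_ifs with h
  · rw [fmod_emod]
  · rfl

-- ---- the exact (mod-free) product identities ----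
lemma stepE_one (r : Int) : stepE [1] r = [-r, 1] := by
  simp [stepE, List.range_succ, sEnt, dg]

lemma dg_linear (r : Int) (m : Nat) :
    dg [-r, 1] m = if m = 0 then -r else if m = 1 then 1 else 0 := by
  match m with
  | 0 => rfl
  | 1 => rfl
  | (n+2) => simp [dg]

lemma convE_linear (x : List Int) (r : Int) : convE x [-r, 1] = stepE x r := by
  apply eq_of_dg (by simp [convE, stepE])
  intro k
  rw [dg_convE, dg_stepE]
  unfold cEnt cEntP sEnt
  have hterm : ∀ i ∈ Finset.range x.length,
      dg x i * (if i ≤ k then dg [-r, 1] (k - i) else 0)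
        = (if i = k then dg x i * (-r) else 0) + (if i + 1 = k then dg x i else 0) := by
    intro i _
    rcases Nat.lt_trichotomy i k with h | h | h
    · rw [if_pos (by omega), if_neg (by omega), dg_linear]
      split_ifs with h1 h2 <;> simp_all <;> omega
    · subst h
      rw [if_pos le_rfl, if_pos rfl, if_neg (by omega), Nat.sub_self, dg_linear]
      simp
    · rw [if_neg (by omega), if_neg (by omega), if_neg (by omega)]
      simp
  rw [Finset.sum_congr rfl hterm, Finset.sum_add_distrib]
  have h1 : (∑ i ∈ Finset.range x.length, if i = k then dg x i * (-r) else 0)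
      = dg x k * (-r) := by
    rw [Finset.sum_ite_eq' (Finset.range x.length) k (fun i => dg x i * (-r))]
    split_ifs with h
    · rfl
    · rw [dg_of_ge (by simp at h; omega), zero_mul]
  have h2 : (∑ i ∈ Finset.range x.length, if i + 1 = k then dg x i else 0)
      = if k = 0 then 0 else dg x (k - 1) := by
    split_ifs with h0
    · subst h0
      apply Finset.sum_eq_zero; intro i _; rw [if_neg (by omega)]
    · have : ∀ i, (i + 1 = k) ↔ (i = k - 1) := by intro i; omega
      simp only [this]
      rw [Finset.sum_ite_eq' (Finset.range x.length) (k-1) (fun i => dg x i)]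
      split_ifs with h
      · rfl
      · rw [dg_of_ge (by simp at h; omega)]
  rw [h1, h2]
  ring

lemma convE_stepE (x y : List Int) (r : Int) (hy : y ≠ []) :
    convE x (stepE y r) = stepE (convE x y) r := by
  have hly : 1 ≤ y.length := List.length_pos_of_ne_nil hy
  apply eq_of_dg (by simp [convE, stepE]; omega)
  intro k
  rw [dg_convE, dg_stepE]
  unfold sEnt
  rw [dg_convE, dg_convE]
  unfold cEnt cEntP
  have hterm : ∀ i ∈ Finset.range x.length,
      dg x i * (if i ≤ k then dg (stepE y r) (k - i) else 0)
        = (if ¬ k = 0 ∧ i ≤ k - 1 then dg x i * dg y (k - 1 - i) else 0)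
          - (if i ≤ k then dg x i * dg y (k - i) else 0) * r := by
    intro i _
    rw [dg_stepE]
    unfold sEnt
    by_cases hik : i ≤ k
    · by_cases hiek : i = k
      · subst hiek
        rw [Nat.sub_self, if_pos le_rfl, if_pos rfl, if_pos le_rfl, if_neg (by omega)]
        ring
      · rw [if_pos hik, if_neg (by omega), if_pos (show ¬ k = 0 ∧ i ≤ k - 1 by omega),
            if_pos hik, show k - i - 1 = k - 1 - i by omega]
        ring
    · rw [if_neg hik, if_neg hik, if_neg (by omega)]
      ring
  rw [Finset.sum_congr rfl hterm, Finset.sum_sub_distrib]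
  have h2 : (∑ i ∈ Finset.range x.length, (if i ≤ k then dg x i * dg y (k - i) else 0) * r)
      = (∑ i ∈ Finset.range x.length, dg x i * (if i ≤ k then dg y (k - i) else 0)) * r := by
    rw [Finset.sum_mul]
    apply Finset.sum_congr rfl
    intro i _
    split_ifs <;> ring
  have h1 : (∑ i ∈ Finset.range x.length, if ¬ k = 0 ∧ i ≤ k - 1 then dg x i * dg y (k - 1 - i) else 0)
      = if k = 0 then 0 else ∑ i ∈ Finset.range x.length, dg x i * (if i ≤ k - 1 then dg y (k - 1 - i) else 0) := by
    split_ifs with h0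
    · apply Finset.sum_eq_zero; intro i _; rw [if_neg (by simp [h0])]
    · apply Finset.sum_congr rfl
      intro i _
      by_cases hb : i ≤ k - 1
      · rw [if_pos (show ¬ k = 0 ∧ i ≤ k - 1 from ⟨h0, hb⟩), if_pos hb]
      · rw [if_neg (fun hx : ¬ k = 0 ∧ i ≤ k - 1 => hb hx.2), if_neg hb]
        ring
  rw [h1, h2]

lemma polyE_singleton (r : Int) : polyE [r] = [-r, 1] := by
  simp only [polyE, List.foldl_cons, List.foldl_nil]
  exact stepE_one r

lemma polyE_append (u v : List Int) (_hu : u ≠ []) (hv : v ≠ []) :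
    polyE (u ++ v) = convE (polyE u) (polyE v) := by
  induction v using List.reverseRecOn with
  | nil => exact absurd rfl hv
  | append_singleton v' r ih =>
    rcases eq_or_ne v' [] with hv' | hv'
    · subst hv'
      simp only [List.nil_append]
      rw [polyE_singleton, convE_linear]
      unfold polyE
      rw [List.foldl_append]
      rfl
    · have ihe := ih hv'
      rw [← List.append_assoc]
      have e1 : polyE ((u ++ v') ++ [r]) = stepE (polyE (u ++ v')) r := by
        unfold polyE; rw [List.foldl_append]; rfl
      have e2 : polyE (v' ++ [r]) = stepE (polyE v') r := by
        unfold polyE; rw [List.foldl_append]; rfl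
      rw [e1, ihe, e2, convE_stepE _ _ _ (polyE_ne_nil v')]

-- ---- tying B to polyE ----
lemma pvProd_spec (p : Int) : ∀ (rs : List Int), rs ≠ [] →
    pvProd p rs = (polyE rs).map (·.fmod p) := by
  intro rs
  induction rs using pvProd.induct with
  | case1 => intro h; exact absurd rfl h
  | case2 r =>
    intro _
    rw [polyE_singleton]
    simp [pvProd, pmod_def, List.map]
  | case3 r0 r1 rest ih1 ih2 =>
    intro _
    rw [pvProd]
    have htne : (r0 :: r1 :: rest).take ((r0 :: r1 :: rest).length / 2) ≠ [] := by
      intro h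
      have := congrArg List.length h
      simp only [List.length_take, List.length_cons, List.length_nil] at this
      omega
    have hdne : (r0 :: r1 :: rest).drop ((r0 :: r1 :: rest).length / 2) ≠ [] := by
      intro h
      have := congrArg List.length h
      simp only [List.length_drop, List.length_cons, List.length_nil] at this
      omega
    rw [ih1 htne, ih2 hdne, pvMulB_spec, convE_fmod_congr,
        ← polyE_append _ _ htne hdne, List.take_append_drop]

-- ===== VERDICT (by name: the statement is the Claim_ definition above) =====
theorem poly_from_roots_spec : Claim_equal_poly_from_roots := by
  intro roots p _ _
  unfold Spec_poly_from_roots poly_from_roots_alt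
  rcases eq_or_ne roots [] with h | h
  · subst h; simp [poly_from_roots, pvProd]
  · rw [polyA_spec p roots h, pvProd_spec p roots h]
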